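-- pv_equiv track=rewrite | github.com/timstuby/ProgrammingForEconomistsMidTerm | q5.py | count_un_an_patterns
-- ===== SOURCE A (Python) =====
-- def count_un_an_patterns(text):
--     """
--     Counts the number of occurrences of a pattern that starts with "un", has unlimited number of letters and ends with "an"
--
--     Args:
--         text: The text to search.
--
--     Returns:
--         The number of occurrences of the pattern.
--     """
--     count = 0
--     i = 0  # Initialize an index to track our position in the text
--
--     while i < len(text):
--         # Check if we find the start of the pattern ("un")
--         if text[i:i + 2] == "un":
--             j = i + 2  # Move the index past the "un"
--
--             # Keep moving until we find "an" or the end of the text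
--             while j < len(text) and text[j:j + 2] != "an":
--                 j += 1
--
--             # Check if we found the "an" ending
--             if j < len(text) and text[j:j + 2] == "an":
--                 count += 1
--                 i = j + 2  # Move past the completed pattern to find the next one
--             else:
--                 i += 1  # If "an" wasn't found, move on in the text
--
--         else:
--             i += 1  # No "un" found, move to the next character
--
--     return count
-- ===== SOURCE B (Python) =====
-- def count_un_an_patterns(text):
--     """Two-pointer greedy over precomputed index lists of "un" and "an" starts."""
--     n = len(text)
--     U = [i for i in range(n) if text[i:i + 2] == "un"]
--     V = [i for i in range(n) if text[i:i + 2] == "an"]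
--     count = 0
--     iu = 0
--     iv = 0
--     pos = 0
--     while True:
--         while iu < len(U) and U[iu] < pos:
--             iu += 1
--         if iu == len(U):
--             break
--         u = U[iu]
--         while iv < len(V) and V[iv] < u + 2:
--             iv += 1
--         if iv == len(V):
--             break
--         count += 1
--         pos = V[iv] + 2
--         iu += 1
--         iv += 1
--     return count
-- ===== Notes on version B (the rewrite author's own statement) =====
-- stated objective: alternative
-- what changed: A rescans for 'an' from scratch inside its character-by-character index loop; B precomputes the sorted lists of 'un' and 'an' start indices in one pass and counts by a two-pointer greedy merge over those lists.
import Mathlib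
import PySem

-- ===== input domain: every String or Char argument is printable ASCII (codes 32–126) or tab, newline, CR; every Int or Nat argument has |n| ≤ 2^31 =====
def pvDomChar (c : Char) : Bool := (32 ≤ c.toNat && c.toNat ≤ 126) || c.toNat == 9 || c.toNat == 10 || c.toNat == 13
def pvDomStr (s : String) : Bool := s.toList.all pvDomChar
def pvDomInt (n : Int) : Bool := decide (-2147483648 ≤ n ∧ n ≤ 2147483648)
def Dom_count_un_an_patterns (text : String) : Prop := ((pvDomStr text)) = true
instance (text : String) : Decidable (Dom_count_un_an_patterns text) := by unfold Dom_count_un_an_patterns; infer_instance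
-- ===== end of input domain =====

-- B replaces A's rescanning index loops by one pass building the "un"/"an" start-index
-- lists and a two-pointer greedy merge over them (objective: alternative decomposition).

-- text[i:i+2] == "xy" for a Nat index i (Python slice with nonnegative bounds; exact via PySem.List.slice)
def pvPairEq (cs : List Char) (i : Nat) (c1 c2 : Char) : Bool :=
  PySem.List.slice cs (some (i : Int)) (some ((i : Int) + 2)) == [c1, c2]

-- ===== PORT A =====
-- inner `while j < len(text) and text[j:j+2] != "an": j += 1` — returns the final j
def pvInnerA (cs : List Char) (j : Nat) : Nat :=
  if j < cs.length then
    if pvPairEq cs j 'a' 'n' then j else pvInnerA cs (j + 1)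
  else j
termination_by cs.length - j
decreasing_by omega

-- the inner loop never moves backwards (used for the outer loop's termination)
theorem pvInnerA_ge (cs : List Char) (j : Nat) : j ≤ pvInnerA cs j := by
  fun_induction pvInnerA cs j with
  | case1 => omega
  | case2 _ _ ih => omega
  | case3 => omega

-- outer `while i < len(text)` with the running count (j = pvInnerA cs (i + 2))
def pvOuterA (cs : List Char) (i : Nat) (count : Int) : Int :=
  if i < cs.length then
    if pvPairEq cs i 'u' 'n' then
      if pvInnerA cs (i + 2) < cs.length ∧ pvPairEq cs (pvInnerA cs (i + 2)) 'a' 'n' then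
        pvOuterA cs (pvInnerA cs (i + 2) + 2) (count + 1)
      else
        pvOuterA cs (i + 1) count
    else
      pvOuterA cs (i + 1) count
  else count
termination_by cs.length - i
decreasing_by
  · have := pvInnerA_ge cs (i + 2); omega
  · omega
  · omega

def count_un_an_patterns (text : String) : Int :=
  pvOuterA text.toList 0 0

-- ===== PORT B =====
-- the `while True` loop of B: the two pointer-advancing inner whiles are the dropWhiles
def pvGoB (us vs : List Nat) (pos : Nat) (count : Int) : Int :=
  match h : us.dropWhile (· < pos) with
  | [] => count
  | u :: us' =>
    match vs.dropWhile (· < u + 2) with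
    | [] => count
    | v :: vs' => pvGoB us' vs' (v + 2) (count + 1)
termination_by us.length
decreasing_by
  have := List.length_dropWhile_le (· < pos) us
  rw [h] at this; simp at this; omega

def count_un_an_patterns_alt (text : String) : Int :=
  let cs := text.toList
  let n := cs.length
  let U := (List.range n).filter (fun i => pvPairEq cs i 'u' 'n')
  let V := (List.range n).filter (fun i => pvPairEq cs i 'a' 'n')
  pvGoB U V 0 0

-- ===== PRECONDITION & SPEC =====
def Spec_count_un_an_patterns (text : String) (out : Int) : Prop := out = count_un_an_patterns_alt text
instance (text : String) (out : Int) : Decidable (Spec_count_un_an_patterns text out) := by unfold Spec_count_un_an_patterns; infer_instance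

-- ===== CLAIM (what is proved, stated in full; the proofs are below) =====
def Claim_equal_count_un_an_patterns : Prop := ∀ (text : String), Dom_count_un_an_patterns text → Spec_count_un_an_patterns text (count_un_an_patterns text)

-- ===== LEMMAS AND PROOFS =====

-- one-step unfoldings of pvGoB, by the shape of the two dropWhile results
theorem pvGoB_nil (us vs : List Nat) (pos : Nat) (count : Int)
    (h1 : us.dropWhile (· < pos) = []) : pvGoB us vs pos count = count := by
  rw [pvGoB.eq_def, h1]

theorem pvGoB_cons_nil (us vs us' : List Nat) (u pos : Nat) (count : Int)
    (h1 : us.dropWhile (· < pos) = u :: us') (h2 : vs.dropWhile (· < u + 2) = []) :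
    pvGoB us vs pos count = count := by
  rw [pvGoB.eq_def]
  split
  · rfl
  · rename_i u1 us1 heq
    rw [h1] at heq
    obtain ⟨rfl, rfl⟩ : u1 = u ∧ us1 = us' := by simpa using heq.symm
    rw [h2]

theorem pvGoB_cons_cons (us vs us' vs' : List Nat) (u v pos : Nat) (count : Int)
    (h1 : us.dropWhile (· < pos) = u :: us') (h2 : vs.dropWhile (· < u + 2) = v :: vs') :
    pvGoB us vs pos count = pvGoB us' vs' (v + 2) (count + 1) := by
  rw [pvGoB.eq_def]
  split
  · rename_i heq; rw [h1] at heq; simp at heq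
  · rename_i u1 us1 heq
    rw [h1] at heq
    obtain ⟨rfl, rfl⟩ : u1 = u ∧ us1 = us' := by simpa using heq.symm
    rw [h2]

-- range' pos (n - pos) as a cons
theorem pvRangeCons (n pos : Nat) (h : pos < n) :
    List.range' pos (n - pos) = pos :: List.range' (pos + 1) (n - (pos + 1)) := by
  have h1 : n - pos = (n - (pos + 1)) + 1 := by omega
  rw [h1, List.range'_succ]

-- dropping the indices below `pos` from a filtered range = the filtered range from `pos`
theorem pvDW (p : Nat → Bool) (n pos : Nat) :
    ∀ a, a ≤ pos →
      ((List.range' a (n - a)).filter p).dropWhile (· < pos)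
        = (List.range' pos (n - pos)).filter p := by
  intro a ha
  induction hk : pos - a generalizing a with
  | zero =>
    have : a = pos := by omega
    subst this
    rw [List.dropWhile_eq_self_iff]
    intro hl hhead
    have hmem := List.getElem_mem hl
    have hm := List.mem_of_mem_filter hmem
    have := (List.mem_range'_1).mp hm
    simp at hhead
    omega
  | succ k ih =>
    by_cases hn : a < n
    · rw [pvRangeCons n a hn]
      rw [List.filter_cons]
      by_cases hpa : p a
      · simp only [hpa, if_pos]
        rw [List.dropWhile_cons]
        have : a < pos := by omega
        simp only [this, decide_true, if_true]
        exact ih (a + 1) (by omega) (by omega)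
      · simp only [hpa]
        simp only [Bool.false_eq_true, if_false]
        exact ih (a + 1) (by omega) (by omega)
    · have h1 : n - a = 0 := by omega
      have h2 : n - pos = 0 := by omega
      simp [h1, h2]

-- inversion of a cons-shaped filtered range
theorem pvFilterConsInv (p : Nat → Bool) (n : Nat) :
    ∀ a v vrest, (List.range' a (n - a)).filter p = v :: vrest →
      a ≤ v ∧ v < n ∧ p v = true ∧
      vrest = (List.range' (v + 1) (n - (v + 1))).filter p ∧
      (∀ w, a ≤ w → w < v → p w = false) := by
  intro a v vrest h
  induction hk : n - a generalizing a with
  | zero => rw [hk] at h; simp at h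
  | succ k ih =>
    have hn : a < n := by omega
    rw [pvRangeCons n a hn, List.filter_cons] at h
    by_cases hpa : p a
    · simp only [hpa, if_pos] at h
      obtain ⟨h1, h2⟩ := List.cons.inj h
      subst h1
      exact ⟨le_refl a, hn, hpa, h2.symm, by omega⟩
    · simp only [hpa, Bool.false_eq_true, if_false] at h
      obtain ⟨hle, hlt, hp, hrest, hnone⟩ := ih (a + 1) h (by omega)
      refine ⟨by omega, hlt, hp, hrest, ?_⟩
      intro w hw1 hw2
      rcases Nat.eq_or_lt_of_le hw1 with heq | hlt'
      · subst heq; simpa using hpa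
      · exact hnone w (by omega) hw2

-- the inner loop stops exactly at the first "an" start ≥ j
theorem pvInnerA_eq (cs : List Char) :
    ∀ j v, j ≤ v → v < cs.length → pvPairEq cs v 'a' 'n' = true →
      (∀ w, j ≤ w → w < v → pvPairEq cs w 'a' 'n' = false) →
      pvInnerA cs j = v := by
  intro j v hjv
  induction hk : v - j generalizing j with
  | zero =>
    intro hv hq _
    have : j = v := by omega
    subst this
    rw [pvInnerA]
    simp [hv, hq]
  | succ k ih =>
    intro hv hq hnone
    have hj : j < cs.length := by omega
    have hqj : pvPairEq cs j 'a' 'n' = false := hnone j (le_refl j) (by omega)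
    rw [pvInnerA]
    simp only [hj, if_pos, hqj, Bool.false_eq_true, if_false]
    exact ih (j + 1) (by omega) (by omega) hv hq (fun w hw1 hw2 => hnone w (by omega) hw2)

-- if there is no "an" start in [m, n), the outer loop adds nothing from any i with m ≤ i + 2
theorem pvOuterA_zero (cs : List Char) (m : Nat)
    (hq : (List.range' m (cs.length - m)).filter (fun i => pvPairEq cs i 'a' 'n') = []) :
    ∀ i count, m ≤ i + 2 → pvOuterA cs i count = count := by
  have hno : ∀ r, m ≤ r → r < cs.length → pvPairEq cs r 'a' 'n' = false := by
    intro r h1 h2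
    by_contra hc
    have hr : r ∈ List.range' m (cs.length - m) := by
      rw [List.mem_range'_1]; omega
    have : r ∈ (List.range' m (cs.length - m)).filter (fun i => pvPairEq cs i 'a' 'n') := by
      rw [List.mem_filter]
      exact ⟨hr, by simpa using hc⟩
    rw [hq] at this; simp at this
  intro i count hm
  induction hk : cs.length - i generalizing i with
  | zero =>
    rw [pvOuterA]
    have : ¬ i < cs.length := by omega
    simp [this]
  | succ k ih =>
    have hi : i < cs.length := by omega
    rw [pvOuterA, if_pos hi]
    by_cases hp : pvPairEq cs i 'u' 'n' = true
    · rw [if_pos hp]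
      have hge := pvInnerA_ge cs (i + 2)
      have hguard : ¬ (pvInnerA cs (i + 2) < cs.length ∧ pvPairEq cs (pvInnerA cs (i + 2)) 'a' 'n' = true) := by
        rintro ⟨h1, h2⟩
        have := hno (pvInnerA cs (i + 2)) (by omega) h1
        rw [this] at h2; simp at h2
      rw [if_neg hguard]
      exact ih (i + 1) (by omega) (by omega)
    · rw [if_neg hp]
      exact ih (i + 1) (by omega) (by omega)

-- main invariant: A's scanning loop = B's two-pointer merge on filtered suffix ranges
theorem pvMain (cs : List Char) :
    ∀ k pos a b count, cs.length - pos ≤ k → a ≤ pos → b ≤ pos + 2 →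
      pvOuterA cs pos count
        = pvGoB ((List.range' a (cs.length - a)).filter (fun i => pvPairEq cs i 'u' 'n'))
                ((List.range' b (cs.length - b)).filter (fun i => pvPairEq cs i 'a' 'n'))
                pos count := by
  intro k
  induction k with
  | zero =>
    intro pos a b count hk ha hb
    have hpos : ¬ pos < cs.length := by omega
    have h0 : cs.length - pos = 0 := by omega
    have hdw : ((List.range' a (cs.length - a)).filter (fun i => pvPairEq cs i 'u' 'n')).dropWhile (· < pos) = [] := by
      rw [pvDW _ cs.length pos a ha, h0]; simp
    rw [pvOuterA, if_neg hpos, pvGoB_nil _ _ _ _ hdw]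
  | succ k ih =>
    intro pos a b count hk ha hb
    by_cases hpos : pos < cs.length
    · have hUdw := pvDW (fun i => pvPairEq cs i 'u' 'n') cs.length pos a ha
      rw [pvRangeCons cs.length pos hpos, List.filter_cons] at hUdw
      by_cases hp : pvPairEq cs pos 'u' 'n' = true
      · rw [if_pos hp] at hUdw
        have hVdw := pvDW (fun i => pvPairEq cs i 'a' 'n') cs.length (pos + 2) b hb
        rcases hfv : (List.range' (pos + 2) (cs.length - (pos + 2))).filter
            (fun i => pvPairEq cs i 'a' 'n') with _ | ⟨v, vrest⟩
        · rw [hfv] at hVdw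
          rw [pvGoB_cons_nil _ _ _ _ _ _ hUdw hVdw]
          exact pvOuterA_zero cs (pos + 2) hfv pos count (by omega)
        · rw [hfv] at hVdw
          obtain ⟨hv1, hv2, hv3, hv4, hv5⟩ := pvFilterConsInv _ cs.length (pos + 2) v vrest hfv
          rw [pvGoB_cons_cons _ _ _ _ _ _ _ _ hUdw hVdw]
          have hinner : pvInnerA cs (pos + 2) = v := pvInnerA_eq cs (pos + 2) v hv1 hv2 hv3 hv5
          rw [pvOuterA, if_pos hpos, if_pos hp, hinner, if_pos ⟨hv2, hv3⟩, hv4]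
          exact ih (v + 2) (pos + 1) (v + 1) (count + 1) (by omega) (by omega) (by omega)
      · rw [if_neg hp] at hUdw
        rw [pvOuterA, if_pos hpos, if_neg hp]
        rw [ih (pos + 1) (pos + 1) b count (by omega) (by omega) (by omega)]
        have hUdw' := pvDW (fun i => pvPairEq cs i 'u' 'n') cs.length (pos + 1) (pos + 1) (le_refl _)
        rcases hfu : (List.range' (pos + 1) (cs.length - (pos + 1))).filter
            (fun i => pvPairEq cs i 'u' 'n') with _ | ⟨u, urest⟩
        · rw [hfu] at hUdw hUdw'
          rw [pvGoB_nil _ _ _ _ hUdw', pvGoB_nil _ _ _ _ hUdw]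
        · rw [hfu] at hUdw hUdw'
          rcases hdv : ((List.range' b (cs.length - b)).filter
              (fun i => pvPairEq cs i 'a' 'n')).dropWhile (· < u + 2) with _ | ⟨v, vrest⟩
          · rw [pvGoB_cons_nil _ _ _ _ _ _ hUdw' hdv, pvGoB_cons_nil _ _ _ _ _ _ hUdw hdv]
          · rw [pvGoB_cons_cons _ _ _ _ _ _ _ _ hUdw' hdv, pvGoB_cons_cons _ _ _ _ _ _ _ _ hUdw hdv]
    · have h0 : cs.length - pos = 0 := by omega
      have hdw : ((List.range' a (cs.length - a)).filter (fun i => pvPairEq cs i 'u' 'n')).dropWhile (· < pos) = [] := by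
        rw [pvDW _ cs.length pos a ha, h0]; simp
      rw [pvOuterA, if_neg hpos, pvGoB_nil _ _ _ _ hdw]

-- ===== VERDICT (by name: the statement is the Claim_ definition above) =====
theorem count_un_an_patterns_spec : Claim_equal_count_un_an_patterns := by
  intro text _
  unfold Spec_count_un_an_patterns count_un_an_patterns count_un_an_patterns_alt
  have h := pvMain text.toList text.toList.length 0 0 0 0 (by omega) (le_refl 0) (by omega)
  simpa [List.range_eq_range'] using h
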